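-- pv_equiv track=rewrite | github.com/zhenhaoge/StyleTTS2 | text_utils.py | attach_punc
-- ===== SOURCE A (Python) =====
-- punc_list = ['.', ',', '?', '!']
--
-- def attach_punc(text, punc_list=punc_list):
--
--     words = text.split()
--     nwords = len(words)
--     words2 = []
--     for i, word in enumerate(words):
--         if word in punc_list and i > 0:
--             words2[-1] += word
--         else:
--             words2.append(word)
--     text2 = ' '.join(words2)
--     return text2
-- ===== SOURCE B (Python) =====
-- punc_list = ['.', ',', '?', '!']
--
-- def attach_punc(text, punc_list=punc_list):
--     # Two-pointer grouping: each word absorbs the maximal run of standalone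
--     # punctuation tokens that follows it; groups are joined with spaces.
--     ws = text.split()
--     n = len(ws)
--     groups = []
--     i = 0
--     while i < n:
--         j = i + 1
--         while j < n and ws[j] in punc_list:
--             j += 1
--         groups.append(''.join(ws[i:j]))
--         i = j
--     return ' '.join(groups)
-- ===== Notes on version B (the rewrite author's own statement) =====
-- stated objective: alternative
-- what changed: Replaces the enumerate/append loop that mutates the last element of an accumulator list with a two-pointer scan that groups each word with the maximal run of standalone punctuation tokens following it and joins each group once.
import Mathlib
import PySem

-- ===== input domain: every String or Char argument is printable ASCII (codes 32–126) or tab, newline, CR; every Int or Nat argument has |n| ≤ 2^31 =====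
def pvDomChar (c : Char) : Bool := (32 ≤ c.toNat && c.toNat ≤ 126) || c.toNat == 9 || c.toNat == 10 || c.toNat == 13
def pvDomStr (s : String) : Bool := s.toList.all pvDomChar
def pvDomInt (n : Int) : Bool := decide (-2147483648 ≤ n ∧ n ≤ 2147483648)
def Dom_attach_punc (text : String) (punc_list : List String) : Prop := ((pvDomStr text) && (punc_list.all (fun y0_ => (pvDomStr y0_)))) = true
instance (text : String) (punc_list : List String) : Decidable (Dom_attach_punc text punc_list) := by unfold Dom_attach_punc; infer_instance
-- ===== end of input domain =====

-- B replaces A's enumerate/append loop (which mutates the last accumulator entry) by a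
-- two-pointer scan grouping each word with the run of standalone punctuation after it.

-- ===== PORT A =====
def attach_punc (text : String) (punc_list : List String) : String :=
  let words := PySem.Str.split₀ text
  let words2 := (PySem.List.enumerate words).foldl
    (fun words2 iw =>
      if punc_list.contains iw.2 && decide (iw.1 > 0) then
        -- words2[-1] += word; i > 0 guarantees words2 is nonempty in the Python, so getLastD's default is never used
        words2.dropLast ++ [words2.getLastD "" ++ iw.2]
      else
        words2 ++ [iw.2]) ([] : List String)
  PySem.Str.join " " words2

-- ===== PORT B =====
-- inner `while j < n and ws[j] in punc_list` of Source B: splits off the leading run of punctuation tokens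
def pvSpanPunc (punc_list : List String) : List String → List String × List String
  | [] => ([], [])
  | w :: ws =>
    if punc_list.contains w then
      let r := pvSpanPunc punc_list ws
      (w :: r.1, r.2)
    else ([], w :: ws)

theorem pvSpanPunc_snd_length (punc_list : List String) :
    ∀ ws : List String, (pvSpanPunc punc_list ws).2.length ≤ ws.length := by
  intro ws
  induction ws with
  | nil => simp [pvSpanPunc]
  | cons w ws ih =>
    by_cases h : w ∈ punc_list
    · simp [pvSpanPunc, h]; omega
    · simp [pvSpanPunc, h]

-- outer `while i < n` of Source B: one group per iteration
def pvGroups (punc_list : List String) : List String → List String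
  | [] => []
  | w :: ws =>
    let r := pvSpanPunc punc_list ws
    PySem.Str.join "" (w :: r.1) :: pvGroups punc_list r.2
  termination_by ws => ws.length
  decreasing_by
    simpa using Nat.lt_succ_of_le (pvSpanPunc_snd_length punc_list ws)

def attach_punc_alt (text : String) (punc_list : List String) : String :=
  PySem.Str.join " " (pvGroups punc_list (PySem.Str.split₀ text))

-- ===== PRECONDITION & SPEC =====
def Spec_attach_punc (text : String) (punc_list : List String) (out : String) : Prop := out = attach_punc_alt text punc_list
instance (text : String) (punc_list : List String) (out : String) : Decidable (Spec_attach_punc text punc_list out) := by unfold Spec_attach_punc; infer_instance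

-- ===== CLAIM (what is proved, stated in full; the proofs are below) =====
def Claim_equal_attach_punc : Prop := ∀ (text : String) (punc_list : List String), Dom_attach_punc text punc_list → Spec_attach_punc text punc_list (attach_punc text punc_list)

-- ===== LEMMAS AND PROOFS =====

-- A's loop body for indices i > 0, where the branch condition reduces to the membership test
def pvStep (punc_list : List String) (acc : List String) (w : String) : List String :=
  if punc_list.contains w then acc.dropLast ++ [acc.getLastD "" ++ w] else acc ++ [w]

-- A's loop body on the intended-result view: the last group absorbs punctuation
def pvGAux (punc_list : List String) (x : String) : List String → List String
  | [] => [x]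
  | w :: ws =>
    if punc_list.contains w then pvGAux punc_list (x ++ w) ws
    else x :: pvGAux punc_list w ws

theorem pv_enum_elim (punc_list : List String) :
    ∀ (ws : List String) (s : Int), 1 ≤ s → ∀ acc : List String,
      (PySem.List.enumerate ws s).foldl
        (fun words2 iw =>
          if punc_list.contains iw.2 && decide (iw.1 > 0) then
            words2.dropLast ++ [words2.getLastD "" ++ iw.2]
          else
            words2 ++ [iw.2]) acc
      = ws.foldl (pvStep punc_list) acc := by
  intro ws
  induction ws with
  | nil => intro s _ acc; simp [PySem.List.enumerate_nil]
  | cons w ws ih =>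
    intro s hs acc
    rw [PySem.List.enumerate_cons, List.foldl_cons, List.foldl_cons]
    have hpos : s > 0 := by omega
    rw [ih (s + 1) (by omega)]
    by_cases h : w ∈ punc_list <;> simp [h, hpos, pvStep]

theorem pv_fold_gAux (punc_list : List String) :
    ∀ (ws init : List String) (x : String),
      ws.foldl (pvStep punc_list) (init ++ [x]) = init ++ pvGAux punc_list x ws := by
  intro ws
  induction ws with
  | nil => intro init x; simp [pvGAux]
  | cons w ws ih =>
    intro init x
    rw [List.foldl_cons]
    by_cases h : w ∈ punc_list
    · rw [show pvStep punc_list (init ++ [x]) w = init ++ [x ++ w] by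
        simp [pvStep, h]]
      rw [ih init (x ++ w)]
      simp [pvGAux, h]
    · rw [show pvStep punc_list (init ++ [x]) w = (init ++ [x]) ++ [w] by
        simp [pvStep, h]]
      rw [ih (init ++ [x]) w]
      simp [pvGAux, h]

theorem pv_join_empty_single (x : String) : PySem.Str.join "" [x] = x := by
  have h : (PySem.Str.join "" [x]).toList = x.toList := by
    simp [PySem.Chars.join_singleton]
  exact String.ext (by simp_all)

theorem pv_join_empty_merge (x w : String) (l : List String) :
    PySem.Str.join "" (x :: w :: l) = PySem.Str.join "" ((x ++ w) :: l) := by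
  have h : (PySem.Str.join "" (x :: w :: l)).toList
      = (PySem.Str.join "" ((x ++ w) :: l)).toList := by
    cases l <;>
      simp [PySem.Chars.join_cons_cons, PySem.Chars.join_singleton]
  exact String.ext (by simp_all)

theorem pv_gAux_groups (punc_list : List String) :
    ∀ (ws : List String) (x : String),
      pvGAux punc_list x ws
        = PySem.Str.join "" (x :: (pvSpanPunc punc_list ws).1)
            :: pvGroups punc_list (pvSpanPunc punc_list ws).2 := by
  intro ws
  induction ws with
  | nil => intro x; simp [pvGAux, pvSpanPunc, pvGroups, pv_join_empty_single]
  | cons w ws ih =>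
    intro x
    by_cases h : w ∈ punc_list
    · rw [show pvGAux punc_list x (w :: ws) = pvGAux punc_list (x ++ w) ws by
        simp [pvGAux, h]]
      rw [ih (x ++ w)]
      simp [pvSpanPunc, h, pv_join_empty_merge]
    · rw [show pvGAux punc_list x (w :: ws) = x :: pvGAux punc_list w ws by
        simp [pvGAux, h]]
      rw [ih w]
      simp [pvSpanPunc, h, pvGroups, pv_join_empty_single]

theorem pv_fold_eq_groups (punc_list : List String) (words : List String) :
    (PySem.List.enumerate words).foldl
      (fun words2 iw =>
        if punc_list.contains iw.2 && decide (iw.1 > 0) then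
          words2.dropLast ++ [words2.getLastD "" ++ iw.2]
        else
          words2 ++ [iw.2]) ([] : List String)
      = pvGroups punc_list words := by
  cases words with
  | nil => simp [PySem.List.enumerate_nil, pvGroups]
  | cons w ws =>
    rw [PySem.List.enumerate_cons, List.foldl_cons]
    rw [show (if punc_list.contains ((0:Int), w).2 && decide (((0:Int), w).1 > 0) then
          ([] : List String).dropLast ++ [([] : List String).getLastD "" ++ ((0:Int), w).2]
        else ([] : List String) ++ [((0:Int), w).2]) = [w] by simp]
    rw [show (0:Int) + 1 = 1 by norm_num]
    rw [pv_enum_elim punc_list ws 1 (by omega)]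
    have h := pv_fold_gAux punc_list ws [] w
    simp only [List.nil_append] at h
    rw [h, pv_gAux_groups]
    conv_rhs => rw [pvGroups]

-- ===== VERDICT (by name: the statement is the Claim_ definition above) =====
theorem attach_punc_spec : Claim_equal_attach_punc := by
  intro text punc_list _
  unfold Spec_attach_punc
  simp only [attach_punc, attach_punc_alt, pv_fold_eq_groups]
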